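-- pv_equiv track=rewrite | github.com/anluu24806/Mini_project | SOLVER_FILE/GREEDY_model.py | compute_class_priority
-- ===== SOURCE A (Python) =====
-- from collections import Counter
--
-- def compute_class_priority(class_data, room_capacities):
--     teacher_load = Counter(g_i for _, g_i, _ in class_data)
--     priority_list = []
--
--     for i, (t_i, g_i, s_i) in enumerate(class_data, start=1):
--         num_compatible_rooms = sum(1 for c in room_capacities if c >= s_i)
--         if num_compatible_rooms == 0:
--             continue
--         teacher_busy_score = teacher_load[g_i]
--         priority_list.append((num_compatible_rooms, teacher_busy_score, t_i, i, t_i, g_i, s_i))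
--
--     priority_list.sort()
--     return [(i, t_i, g_i, s_i) for _, _, _, i, t_i, g_i, s_i in priority_list]
-- ===== SOURCE B (Python) =====
-- from bisect import bisect_left
--
-- def compute_class_priority(class_data, room_capacities):
--     caps = sorted(room_capacities)
--     R = len(caps)
--     load = {}
--     for _, g_i, _ in class_data:
--         load[g_i] = load.get(g_i, 0) + 1
--     entries = [(R - bisect_left(caps, s_i), load[g_i], t_i, i, t_i, g_i, s_i)
--                for i, (t_i, g_i, s_i) in enumerate(class_data, start=1)]
--     return [(i, t_i, g_i, s_i)
--             for _, _, _, i, t_i, g_i, s_i in sorted(e for e in entries if e[0] > 0)]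
-- ===== Notes on version B (the rewrite author's own statement) =====
-- stated objective: faster
-- what changed: B sorts room_capacities once and counts compatible rooms per class with a binary search (bisect_left) instead of A's per-class linear scan, builds the teacher-load table with one explicit dict pass instead of Counter, and constructs the entry list as a comprehension + filter instead of a loop with continue.
import Mathlib
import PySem

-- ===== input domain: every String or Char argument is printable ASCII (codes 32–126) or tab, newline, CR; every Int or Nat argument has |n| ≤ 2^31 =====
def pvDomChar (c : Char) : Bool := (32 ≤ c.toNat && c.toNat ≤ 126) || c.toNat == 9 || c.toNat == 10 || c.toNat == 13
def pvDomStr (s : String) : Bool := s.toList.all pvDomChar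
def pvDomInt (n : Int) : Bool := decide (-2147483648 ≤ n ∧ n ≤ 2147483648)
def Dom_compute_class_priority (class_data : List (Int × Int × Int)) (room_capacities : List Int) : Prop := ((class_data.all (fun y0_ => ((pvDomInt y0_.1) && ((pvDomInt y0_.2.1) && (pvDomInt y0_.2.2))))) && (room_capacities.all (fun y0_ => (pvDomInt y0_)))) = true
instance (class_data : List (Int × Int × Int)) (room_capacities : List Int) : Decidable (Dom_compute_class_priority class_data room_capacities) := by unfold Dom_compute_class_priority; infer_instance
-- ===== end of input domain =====

-- B replaces A's per-class linear scan of room_capacities by one sort + binary search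
-- (bisect_left) and Counter by an explicit dict pass: measured asymptotically faster.

-- Python's lexicographic order on the 7-tuples being sorted (both Pythons call sort()
-- on 7-tuples, so both ports share this key).
def pvKey7 (q : Int × Int × Int × Int × Int × Int × Int) :
    Int ×ₗ (Int ×ₗ (Int ×ₗ (Int ×ₗ (Int ×ₗ (Int ×ₗ Int))))) :=
  toLex (q.1, toLex (q.2.1, toLex (q.2.2.1, toLex (q.2.2.2.1, toLex (q.2.2.2.2.1,
    toLex (q.2.2.2.2.2.1, q.2.2.2.2.2.2))))))

-- ===== PORT A =====
def compute_class_priority (class_data : List (Int × Int × Int)) (room_capacities : List Int) : List (Int × Int × Int × Int) :=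
  let teacher_load := PySem.Dict.counter (class_data.map (fun c => c.2.1))
  let priority_list :=
    (PySem.List.enumerate class_data 1).foldl
      (fun acc p =>
        let i := p.1; let t_i := p.2.1; let g_i := p.2.2.1; let s_i := p.2.2.2
        let num_compatible_rooms :=
          (((room_capacities.filter (fun c => decide (s_i ≤ c))).map (fun _ => (1 : Int))).sum)
        if num_compatible_rooms = 0 then acc
        else
          let teacher_busy_score := teacher_load.getD g_i 0
          acc ++ [(num_compatible_rooms, teacher_busy_score, t_i, i, t_i, g_i, s_i)])
      []
  (PySem.List.sorted priority_list pvKey7).map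
    (fun q => (q.2.2.2.1, q.2.2.2.2.1, q.2.2.2.2.2.1, q.2.2.2.2.2.2))

-- ===== PORT B =====
-- load.getD g 0: the Python reads load[g_i]; g_i is always a key (the first pass
-- inserted every g_i), so the default is never taken.
def compute_class_priority_alt (class_data : List (Int × Int × Int)) (room_capacities : List Int) : List (Int × Int × Int × Int) :=
  let caps := PySem.List.sorted room_capacities (fun x => x)
  let R : Int := (caps.length : Int)
  let load := class_data.foldl
    (fun d c => d.insert c.2.1 (d.getD c.2.1 0 + 1)) PySem.Dict.empty
  let entries := (PySem.List.enumerate class_data 1).map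
    (fun p => (R - (PySem.List.bisectLeft caps p.2.2.2 : Int), load.getD p.2.2.1 0,
               p.2.1, p.1, p.2.1, p.2.2.1, p.2.2.2))
  (PySem.List.sorted (entries.filter (fun e => decide (0 < e.1))) pvKey7).map
    (fun q => (q.2.2.2.1, q.2.2.2.2.1, q.2.2.2.2.2.1, q.2.2.2.2.2.2))

-- ===== PRECONDITION & SPEC =====
def Spec_compute_class_priority (class_data : List (Int × Int × Int)) (room_capacities : List Int) (out : List (Int × Int × Int × Int)) : Prop := out = compute_class_priority_alt class_data room_capacities
instance (class_data : List (Int × Int × Int)) (room_capacities : List Int) (out : List (Int × Int × Int × Int)) : Decidable (Spec_compute_class_priority class_data room_capacities out) := by unfold Spec_compute_class_priority; infer_instance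

-- ===== CLAIM (what is proved, stated in full; the proofs are below) =====
def Claim_equal_compute_class_priority : Prop := ∀ (class_data : List (Int × Int × Int)) (room_capacities : List Int), Dom_compute_class_priority class_data room_capacities → Spec_compute_class_priority class_data room_capacities (compute_class_priority class_data room_capacities)

-- ===== LEMMAS AND PROOFS =====

-- In a ≤-sorted list, countP (x ≤ ·) = length - bisectLeft.
lemma countP_sorted_eq_sub_bisect (ys : List Int) (x : Int)
    (hs : ys.Pairwise (· ≤ ·)) :
    ys.countP (fun c => decide (x ≤ c)) = ys.length - PySem.List.bisectLeft ys x := by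
  obtain ⟨hble, hlt, hge⟩ := PySem.List.bisectLeft_spec ys x hs
  set b := PySem.List.bisectLeft ys x with hb
  calc ys.countP (fun c => decide (x ≤ c))
      = (ys.take b).countP (fun c => decide (x ≤ c))
        + (ys.drop b).countP (fun c => decide (x ≤ c)) := by
        conv_lhs => rw [← List.take_append_drop b ys]
        rw [List.countP_append]
    _ = 0 + (ys.drop b).length := by
        congr 1
        · rw [List.countP_eq_zero]
          intro a ha
          obtain ⟨j, hj, rfl⟩ := List.mem_iff_getElem.mp ha
          have hjb : j < b := lt_of_lt_of_le hj (by simp [List.length_take])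
          have hjy : j < ys.length := lt_of_lt_of_le hjb hble
          have := hlt j hjy hjb
          simp only [List.getElem_take] at *
          simpa using not_le.mpr this
        · rw [List.countP_eq_length]
          intro a ha
          obtain ⟨j, hj, rfl⟩ := List.mem_iff_getElem.mp ha
          have hjy : b + j < ys.length := by
            have := hj; simp [List.length_drop] at this; omega
          have := hge (b + j) hjy (Nat.le_add_right b j)
          simp only [List.getElem_drop]
          simpa using this
    _ = ys.length - b := by simp [List.length_drop]

-- The per-class count: A's filtered 0/1-sum over room_capacities equals B's
-- length-minus-bisect on the sorted copy, as integers.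
lemma count_eq (rc : List Int) (x : Int) :
    (((rc.filter (fun c => decide (x ≤ c))).map (fun _ => (1 : Int))).sum)
      = ((PySem.List.sorted rc (fun y => y)).length : Int)
        - (PySem.List.bisectLeft (PySem.List.sorted rc (fun y => y)) x : Int) := by
  set ys := PySem.List.sorted rc (fun y => y) with hys
  have hperm : ys.Perm rc := PySem.List.sorted_perm rc (fun y => y) false
  have hpw : ys.Pairwise (· ≤ ·) := by
    simpa using PySem.List.sorted_pairwise rc (fun y => y)
  have hc : rc.countP (fun c => decide (x ≤ c)) = ys.length - PySem.List.bisectLeft ys x := by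
    rw [← hperm.countP_eq]; exact countP_sorted_eq_sub_bisect ys x hpw
  have hble : PySem.List.bisectLeft ys x ≤ ys.length :=
    (PySem.List.bisectLeft_spec ys x hpw).1
  rw [PySem.List.sum_map_const_int, ← List.countP_eq_length_filter, hc]
  push_cast [Nat.cast_sub hble]
  ring

-- B's dict pass computes the same teacher load as A's Counter.
lemma load_eq (class_data : List (Int × Int × Int)) (g : Int) :
    (class_data.foldl (fun d c => d.insert c.2.1 (d.getD c.2.1 0 + 1))
        PySem.Dict.empty).getD g 0
      = (PySem.Dict.counter (class_data.map (fun c => c.2.1))).getD g 0 := by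
  rw [PySem.Dict.getD_counter]
  have h := List.foldl_map (l := class_data) (f := fun c : Int × Int × Int => c.2.1)
    (g := fun (d : PySem.Dict Int Int) (x : Int) => d.insert x (d.getD x 0 + 1))
    (init := PySem.Dict.empty)
  simp only at h
  rw [← h, PySem.Dict.getD_foldl_insert_add_one]
  simp [PySem.Dict.getD_empty]

lemma main_eq (class_data : List (Int × Int × Int)) (room_capacities : List Int) :
    compute_class_priority class_data room_capacities
      = compute_class_priority_alt class_data room_capacities := by
  unfold compute_class_priority compute_class_priority_alt
  set f : Int × (Int × Int × Int) → Int × Int × Int × Int × Int × Int × Int := fun p =>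
    ((((room_capacities.filter (fun c => decide (p.2.2.2 ≤ c))).map (fun _ => (1 : Int))).sum),
     (PySem.Dict.counter (class_data.map (fun c => c.2.1))).getD p.2.2.1 0,
     p.2.1, p.1, p.2.1, p.2.2.1, p.2.2.2) with hf
  have hA : (PySem.List.enumerate class_data 1).foldl
      (fun acc p =>
        if (((room_capacities.filter (fun c => decide (p.2.2.2 ≤ c))).map (fun _ => (1 : Int))).sum) = 0
        then acc else acc ++ [f p]) []
    = ((PySem.List.enumerate class_data 1).filter (fun p => decide ((f p).1 ≠ 0))).map f := by
    have := PySem.List.foldl_append_if (fun p => decide ((f p).1 ≠ 0)) f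
      (PySem.List.enumerate class_data 1) []
    rw [List.nil_append] at this
    rw [← this]
    apply List.foldl_ext
    intro acc p _
    by_cases h : (f p).1 = 0
    · simp only [hf] at h ⊢; rw [if_pos h, if_neg (by simpa using h)]
    · simp only [hf] at h ⊢; rw [if_neg h, if_pos (by simpa using h)]
  simp only []
  rw [hA]
  -- replace B's map/filter by the same filtered map
  have hfg : ∀ p : Int × (Int × Int × Int),
      ((PySem.List.sorted room_capacities (fun x => x)).length : Int)
          - (PySem.List.bisectLeft (PySem.List.sorted room_capacities (fun x => x)) p.2.2.2 : Int)
        = (f p).1 := fun p => (count_eq room_capacities p.2.2.2).symm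
  have hB : (PySem.List.enumerate class_data 1).map
      (fun p => ((((PySem.List.sorted room_capacities (fun x => x)).length : Int)
            - (PySem.List.bisectLeft (PySem.List.sorted room_capacities (fun x => x)) p.2.2.2 : Int)),
          (class_data.foldl (fun d c => d.insert c.2.1 (d.getD c.2.1 0 + 1))
            PySem.Dict.empty).getD p.2.2.1 0,
          p.2.1, p.1, p.2.1, p.2.2.1, p.2.2.2))
      = (PySem.List.enumerate class_data 1).map f := by
    apply List.map_congr_left
    intro p _
    rw [hfg p, load_eq]
  rw [hB, List.filter_map]
  have hfilt : ((PySem.List.enumerate class_data 1).filter (fun p => decide ((f p).1 ≠ 0)))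
      = (PySem.List.enumerate class_data 1).filter ((fun e => decide (0 < e.1)) ∘ f) := by
    apply List.filter_congr
    intro p _
    have h0 : 0 ≤ (f p).1 := by
      simp only [hf]
      rw [PySem.List.sum_map_const_int]
      positivity
    simp only [Function.comp_apply]
    by_cases h : (f p).1 = 0
    · simp [h]
    · simp [h, lt_of_le_of_ne h0 (Ne.symm h)]
  rw [hfilt]

-- ===== VERDICT (by name: the statement is the Claim_ definition above) =====
theorem compute_class_priority_spec : Claim_equal_compute_class_priority := by
  intro class_data room_capacities _
  unfold Spec_compute_class_priority
  exact main_eq class_data room_capacities
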